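-- pv_equiv track=rewrite | github.com/VaibhavD143/Coding | ib_ways_to_color_a3d_grid.py | solve
-- ===== SOURCE A (Python) =====
-- def solve(A):
--     colors = [1,2,3,4]
--     possible =[]
--     for i in colors:
--         for j in colors:
--             for k in colors:
--                 if i!=j and j!=k:
--                     possible.append((i,j,k))
--
--     #Three clors possibilities(x,y,z)
--     col3 = 24
--     #Two color combinations(x,y,x)
--     col2 = 12
--     tmp = 0
--     mod = 10**9+7
--     for i in range(1,A):
--         tmp=col3
--         col3 = ((11*col3)%mod+(10*col2)%mod)%mod
--         col2 = ((5*tmp)%mod+(7*col2)%mod)%mod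
--     return (col2+col3)%mod
-- ===== SOURCE B (Python) =====
-- def _mat_mul(x, y, mod):
--     (a, b), (c, d) = x
--     (e, f), (g, h) = y
--     return (((a * e + b * g) % mod, (a * f + b * h) % mod),
--             ((c * e + d * g) % mod, (c * f + d * h) % mod))
--
-- def _mat_pow(m, n, mod):
--     if n == 0:
--         return ((1, 0), (0, 1))
--     h = _mat_pow(m, n // 2, mod)
--     h2 = _mat_mul(h, h, mod)
--     if n % 2 == 1:
--         return _mat_mul(h2, m, mod)
--     return h2
--
-- def solve(A):
--     mod = 10 ** 9 + 7
--     n = A - 1 if A > 1 else 0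
--     p = _mat_pow(((11, 10), (5, 7)), n, mod)
--     (a, b), (c, d) = p
--     col3 = (a * 24 + b * 12) % mod
--     col2 = (c * 24 + d * 12) % mod
--     return (col2 + col3) % mod
-- ===== Notes on version B (the rewrite author's own statement) =====
-- stated objective: faster
-- what changed: replaces the linear step-by-step recurrence loop by binary exponentiation of the two-by-two transition matrix modulo the prime
import Mathlib
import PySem

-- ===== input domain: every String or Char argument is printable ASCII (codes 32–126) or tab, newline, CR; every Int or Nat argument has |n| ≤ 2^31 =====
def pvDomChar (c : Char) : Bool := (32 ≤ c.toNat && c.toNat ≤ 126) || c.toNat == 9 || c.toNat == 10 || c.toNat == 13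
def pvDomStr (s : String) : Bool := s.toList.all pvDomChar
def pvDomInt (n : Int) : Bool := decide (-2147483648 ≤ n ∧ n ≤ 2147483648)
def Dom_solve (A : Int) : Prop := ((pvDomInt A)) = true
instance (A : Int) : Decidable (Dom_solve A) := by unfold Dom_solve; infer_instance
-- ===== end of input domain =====

-- B replaces the O(A) step-by-step recurrence loop by binary exponentiation of the
-- 2x2 transition matrix mod 10^9+7 (O(log A)); same result for every A.

-- ===== PORT A =====
def solve (A : Int) : Int :=
  let mod : Int := 10 ^ 9 + 7
  let res : Int × Int :=
    (PySem.List.pyRange 1 A 1).foldl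
      (fun (s : Int × Int) _ =>
        (((11 * s.1) % mod + (10 * s.2) % mod) % mod,
         ((5 * s.1) % mod + (7 * s.2) % mod) % mod))
      (24, 12)
  (res.2 + res.1) % mod

-- ===== PORT B =====
-- 2x2 integer matrix as a pair of rows
def matMulB (x y : (Int × Int) × (Int × Int)) : (Int × Int) × (Int × Int) :=
  let mod : Int := 10 ^ 9 + 7
  (((x.1.1 * y.1.1 + x.1.2 * y.2.1) % mod, (x.1.1 * y.1.2 + x.1.2 * y.2.2) % mod),
   ((x.2.1 * y.1.1 + x.2.2 * y.2.1) % mod, (x.2.1 * y.1.2 + x.2.2 * y.2.2) % mod))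

def matPowB (m : (Int × Int) × (Int × Int)) (n : Nat) : (Int × Int) × (Int × Int) :=
  if n = 0 then ((1, 0), (0, 1))
  else
    let h := matPowB m (n / 2)
    let h2 := matMulB h h
    if n % 2 = 1 then matMulB h2 m else h2
termination_by n
decreasing_by exact Nat.div_lt_self (Nat.pos_of_ne_zero (by assumption)) (by norm_num)

def solve_alt (A : Int) : Int :=
  let mod : Int := 10 ^ 9 + 7
  let n : Nat := if A > 1 then (A - 1).toNat else 0
  let p := matPowB ((11, 10), (5, 7)) n
  let col3 := (p.1.1 * 24 + p.1.2 * 12) % mod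
  let col2 := (p.2.1 * 24 + p.2.2 * 12) % mod
  (col2 + col3) % mod

-- ===== PRECONDITION & SPEC =====
def Spec_solve (A : Int) (out : Int) : Prop := out = solve_alt A
instance (A : Int) (out : Int) : Decidable (Spec_solve A out) := by unfold Spec_solve; infer_instance

-- ===== CLAIM (what is proved, stated in full; the proofs are below) =====
def Claim_equal_solve : Prop := ∀ (A : Int), Dom_solve A → Spec_solve A (solve A)

-- ===== LEMMAS AND PROOFS =====

-- the modulus, as a natural number
def pvP : ℕ := 1000000007

-- A's loop body
def stepA (s : Int × Int) : Int × Int :=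
  (((11 * s.1) % (1000000007 : Int) + (10 * s.2) % (1000000007 : Int)) % (1000000007 : Int),
   ((5 * s.1) % (1000000007 : Int) + (7 * s.2) % (1000000007 : Int)) % (1000000007 : Int))

-- 2x2 matrices over ZMod pvP, as a pair of rows
def zMul (x y : (ZMod pvP × ZMod pvP) × (ZMod pvP × ZMod pvP)) :
    (ZMod pvP × ZMod pvP) × (ZMod pvP × ZMod pvP) :=
  ((x.1.1 * y.1.1 + x.1.2 * y.2.1, x.1.1 * y.1.2 + x.1.2 * y.2.2),
   (x.2.1 * y.1.1 + x.2.2 * y.2.1, x.2.1 * y.1.2 + x.2.2 * y.2.2))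

def zId : (ZMod pvP × ZMod pvP) × (ZMod pvP × ZMod pvP) := ((1, 0), (0, 1))

def zPow (m : (ZMod pvP × ZMod pvP) × (ZMod pvP × ZMod pvP)) : Nat →
    (ZMod pvP × ZMod pvP) × (ZMod pvP × ZMod pvP)
  | 0 => zId
  | n + 1 => zMul m (zPow m n)

def zApply (m : (ZMod pvP × ZMod pvP) × (ZMod pvP × ZMod pvP)) (v : ZMod pvP × ZMod pvP) :
    ZMod pvP × ZMod pvP :=
  (m.1.1 * v.1 + m.1.2 * v.2, m.2.1 * v.1 + m.2.2 * v.2)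

def pvLiftM (m : (Int × Int) × (Int × Int)) : (ZMod pvP × ZMod pvP) × (ZMod pvP × ZMod pvP) :=
  (((m.1.1 : ZMod pvP), (m.1.2 : ZMod pvP)), ((m.2.1 : ZMod pvP), (m.2.2 : ZMod pvP)))

def liftV (v : Int × Int) : ZMod pvP × ZMod pvP := ((v.1 : ZMod pvP), (v.2 : ZMod pvP))

theorem pvP_int : ((pvP : ℕ) : Int) = (1000000007 : Int) := by norm_num [pvP]

theorem cast_mod_p (a : Int) : ((a % (1000000007 : Int) : Int) : ZMod pvP) = (a : ZMod pvP) := by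
  rw [← pvP_int, ZMod.intCast_mod]

theorem zMul_assoc (a b c : (ZMod pvP × ZMod pvP) × (ZMod pvP × ZMod pvP)) :
    zMul (zMul a b) c = zMul a (zMul b c) := by
  simp only [zMul, Prod.mk.injEq]
  refine ⟨⟨by ring, by ring⟩, by ring, by ring⟩

theorem zMul_id (a : (ZMod pvP × ZMod pvP) × (ZMod pvP × ZMod pvP)) : zMul a zId = a := by
  simp only [zMul, zId]
  refine Prod.ext (Prod.ext ?_ ?_) (Prod.ext ?_ ?_) <;> simp

theorem zId_mul (a : (ZMod pvP × ZMod pvP) × (ZMod pvP × ZMod pvP)) : zMul zId a = a := by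
  simp only [zMul, zId]
  refine Prod.ext (Prod.ext ?_ ?_) (Prod.ext ?_ ?_) <;> simp

theorem zPow_add (m : (ZMod pvP × ZMod pvP) × (ZMod pvP × ZMod pvP)) (i j : Nat) :
    zPow m (i + j) = zMul (zPow m i) (zPow m j) := by
  induction i with
  | zero => simp [zPow, zId_mul]
  | succ i ih =>
      have : i + 1 + j = (i + j) + 1 := by omega
      rw [this]
      show zMul m (zPow m (i + j)) = zMul (zMul m (zPow m i)) (zPow m j)
      rw [ih, zMul_assoc]

theorem liftM_matMulB (x y : (Int × Int) × (Int × Int)) :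
    pvLiftM (matMulB x y) = zMul (pvLiftM x) (pvLiftM y) := by
  simp only [pvLiftM, matMulB, zMul]
  refine Prod.ext (Prod.ext ?_ ?_) (Prod.ext ?_ ?_) <;> push_cast [cast_mod_p] <;> ring

theorem liftM_matPowB (m : (Int × Int) × (Int × Int)) (n : Nat) :
    pvLiftM (matPowB m n) = zPow (pvLiftM m) n := by
  induction n using Nat.strong_induction_on with
  | _ n ih =>
    rw [matPowB]
    by_cases h0 : n = 0
    · subst h0; simp [zPow, pvLiftM, zId]
    · simp only [h0, if_false]
      have hlt : n / 2 < n := Nat.div_lt_self (Nat.pos_of_ne_zero h0) (by norm_num)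
      by_cases hodd : n % 2 = 1
      · simp only [hodd, if_true]
        rw [liftM_matMulB, liftM_matMulB, ih _ hlt]
        have h1 : zMul (zPow (pvLiftM m) (n / 2)) (zPow (pvLiftM m) (n / 2)) =
            zPow (pvLiftM m) (n / 2 + n / 2) := (zPow_add ..).symm
        calc zMul (zMul (zPow (pvLiftM m) (n / 2)) (zPow (pvLiftM m) (n / 2))) (pvLiftM m)
            = zMul (zPow (pvLiftM m) (n / 2 + n / 2)) (zMul (pvLiftM m) zId) := by
              rw [h1, zMul_id]
          _ = zMul (zPow (pvLiftM m) (n / 2 + n / 2)) (zPow (pvLiftM m) 1) := rfl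
          _ = zPow (pvLiftM m) (n / 2 + n / 2 + 1) := (zPow_add ..).symm
          _ = zPow (pvLiftM m) n := by congr 1; omega
      · simp only [hodd, if_false]
        rw [liftM_matMulB, ih _ hlt]
        have : n = n / 2 + n / 2 := by omega
        conv_rhs => rw [this]
        exact (zPow_add ..).symm

def pvMz : (ZMod pvP × ZMod pvP) × (ZMod pvP × ZMod pvP) := ((11, 10), (5, 7))

theorem zApply_mul (a b : (ZMod pvP × ZMod pvP) × (ZMod pvP × ZMod pvP)) (v : ZMod pvP × ZMod pvP) :
    zApply (zMul a b) v = zApply a (zApply b v) := by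
  simp only [zApply, zMul]
  exact Prod.ext (by ring) (by ring)

theorem liftV_stepA (v : Int × Int) : liftV (stepA v) = zApply pvMz (liftV v) := by
  simp only [liftV, stepA, zApply, pvMz]
  refine Prod.ext ?_ ?_ <;> push_cast [cast_mod_p] <;> ring

theorem liftV_iter_stepA (n : Nat) (v : Int × Int) :
    liftV (stepA^[n] v) = zApply (zPow pvMz n) (liftV v) := by
  induction n with
  | zero => simp [zPow, zApply, zId]
  | succ n ih =>
      rw [Function.iterate_succ_apply', liftV_stepA, ih, ← zApply_mul]
      rfl

-- range invariant
def inR (x : Int) : Prop := 0 ≤ x ∧ x < 1000000007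

theorem inR_mod (a : Int) : inR (a % (1000000007 : Int)) :=
  ⟨Int.emod_nonneg a (by norm_num), Int.emod_lt_of_pos a (by norm_num)⟩

theorem stepA_inR (v : Int × Int) : inR (stepA v).1 ∧ inR (stepA v).2 :=
  ⟨inR_mod _, inR_mod _⟩

theorem iter_stepA_inR (n : Nat) (v : Int × Int) (h : inR v.1 ∧ inR v.2) :
    inR (stepA^[n] v).1 ∧ inR (stepA^[n] v).2 := by
  cases n with
  | zero => simpa
  | succ n => rw [Function.iterate_succ_apply']; exact stepA_inR _

theorem eq_of_cast_eq {x y : Int} (hx : inR x) (hy : inR y)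
    (h : (x : ZMod pvP) = (y : ZMod pvP)) : x = y := by
  have := (ZMod.intCast_eq_intCast_iff' x y pvP).mp h
  rwa [pvP_int, Int.emod_eq_of_lt hx.1 hx.2, Int.emod_eq_of_lt hy.1 hy.2] at this

-- foldl with a body that ignores the element is iteration
theorem foldl_const {α β : Type} (f : α → α) (l : List β) (i : α) :
    l.foldl (fun s _ => f s) i = f^[l.length] i := by
  induction l generalizing i with
  | nil => rfl
  | cons x xs ih => simp [List.foldl, ih, Function.iterate_succ_apply]

-- B's matrix-vector result agrees with iterating A's step
theorem matPow_eq_iter (n : Nat) :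
    let p := matPowB ((11, 10), (5, 7)) n
    ((p.1.1 * 24 + p.1.2 * 12) % (1000000007 : Int),
     (p.2.1 * 24 + p.2.2 * 12) % (1000000007 : Int)) = stepA^[n] (24, 12) := by
  intro p
  have hiter := iter_stepA_inR n (24, 12) (by constructor <;> constructor <;> norm_num [inR])
  have hcast : liftV ((p.1.1 * 24 + p.1.2 * 12) % (1000000007 : Int),
      (p.2.1 * 24 + p.2.2 * 12) % (1000000007 : Int)) = liftV (stepA^[n] (24, 12)) := by
    rw [liftV_iter_stepA]
    have hm : pvLiftM (matPowB ((11, 10), (5, 7)) n) = zPow pvMz n := by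
      rw [liftM_matPowB]; rfl
    simp only [liftV, cast_mod_p]
    push_cast
    have h11 : ((p.1.1 : ZMod pvP)) = (zPow pvMz n).1.1 := by rw [← hm]; rfl
    have h12 : ((p.1.2 : ZMod pvP)) = (zPow pvMz n).1.2 := by rw [← hm]; rfl
    have h21 : ((p.2.1 : ZMod pvP)) = (zPow pvMz n).2.1 := by rw [← hm]; rfl
    have h22 : ((p.2.2 : ZMod pvP)) = (zPow pvMz n).2.2 := by rw [← hm]; rfl
    rw [h11, h12, h21, h22]
    simp only [zApply]
  refine Prod.ext ?_ ?_
  · exact eq_of_cast_eq (inR_mod _) hiter.1 (congrArg Prod.fst hcast)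
  · exact eq_of_cast_eq (inR_mod _) hiter.2 (congrArg Prod.snd hcast)

-- ===== VERDICT (by name: the statement is the Claim_ definition above) =====
theorem solve_spec : Claim_equal_solve := by
  intro A _
  unfold Spec_solve solve solve_alt
  simp only []
  have hn : (PySem.List.pyRange 1 A 1).length = (if A > 1 then (A - 1).toNat else 0) := by
    rw [PySem.List.length_pyRange_one]
    split <;> omega
  have hfold : (PySem.List.pyRange 1 A 1).foldl
      (fun (s : Int × Int) _ =>
        (((11 * s.1) % (10 ^ 9 + 7 : Int) + (10 * s.2) % (10 ^ 9 + 7 : Int)) % (10 ^ 9 + 7 : Int),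
         ((5 * s.1) % (10 ^ 9 + 7 : Int) + (7 * s.2) % (10 ^ 9 + 7 : Int)) % (10 ^ 9 + 7 : Int)))
      (24, 12) = stepA^[(if A > 1 then (A - 1).toNat else 0)] (24, 12) := by
    rw [show (fun (s : Int × Int) _ =>
        (((11 * s.1) % (10 ^ 9 + 7 : Int) + (10 * s.2) % (10 ^ 9 + 7 : Int)) % (10 ^ 9 + 7 : Int),
         ((5 * s.1) % (10 ^ 9 + 7 : Int) + (7 * s.2) % (10 ^ 9 + 7 : Int)) % (10 ^ 9 + 7 : Int)))
        = (fun (s : Int × Int) (_ : Int) => stepA s) from by norm_num [stepA],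
      foldl_const, hn]
  rw [hfold]
  have := matPow_eq_iter (if A > 1 then (A - 1).toNat else 0)
  simp only [] at this
  rw [← this]
  norm_num
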